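-- pv_equiv track=rewrite | github.com/nachogoro/andalucia-adabyron-2025 | ProblemaF/src/F.py | bipartitions
-- ===== SOURCE A (Python) =====
-- from itertools import combinations
--
-- def bipartitions(seq):
--     """
--     Yield all unordered 2-way partitions of `seq` (which must contain
--     unique items).  Each partition is returned as a pair of *lists*.
--     """
--     items = list(seq)
--     smallest = min(items)                # canonical anchor
--     n = len(items)
--
--     for r in range(1, n):
--         for subset in combinations(items, r):
--             if smallest not in subset:   # skip the mirror image
--                 continue
--             other = [x for x in items if x not in subset]
--             yield list(subset), other
-- ===== SOURCE B (Python) =====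
-- def _subseqs(xs):
--     # all subsequences of xs in lexicographic-by-position order, [] first
--     if not xs:
--         return [[]]
--     tail = _subseqs(xs[1:])
--     return [[]] + [[xs[0]] + s for s in tail] + tail[1:]
--
-- def bipartitions(seq):
--     """
--     Yield all unordered 2-way partitions of `seq` (unique items).
--     Precomputes the whole powerset of the items other than the minimum
--     once (recursively, in lexicographic order), then emits, size by size,
--     each subset joined with the minimum anchor; both halves are built in
--     one partitioning pass over the original sequence.
--     """
--     items = list(seq)
--     smallest = min(items)
--     n = len(items)
--     rest = list(items)
--     rest.remove(smallest)
--     subs = _subseqs(rest)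
--     for r in range(1, n):
--         for sub in subs:
--             if len(sub) != r - 1:
--                 continue
--             first, other = [], []
--             for x in items:
--                 (first if (x == smallest or x in sub) else other).append(x)
--             yield first, other
-- ===== Notes on version B (the rewrite author's own statement) =====
-- stated objective: alternative
-- what changed: Instead of calling itertools.combinations per size and filtering out combinations missing the minimum anchor, B removes the minimum once, builds the full powerset of the remaining items by one recursive lexicographic construction, selects the subsets of each size from it, and builds both halves in a single partitioning pass with two accumulators instead of two comprehensions.
-- outside the precondition, e.g. on bipartitions([1, 1]): A returns [([1], []), ([1], [])], B returns [([1, 1], [])]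
import Mathlib
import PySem

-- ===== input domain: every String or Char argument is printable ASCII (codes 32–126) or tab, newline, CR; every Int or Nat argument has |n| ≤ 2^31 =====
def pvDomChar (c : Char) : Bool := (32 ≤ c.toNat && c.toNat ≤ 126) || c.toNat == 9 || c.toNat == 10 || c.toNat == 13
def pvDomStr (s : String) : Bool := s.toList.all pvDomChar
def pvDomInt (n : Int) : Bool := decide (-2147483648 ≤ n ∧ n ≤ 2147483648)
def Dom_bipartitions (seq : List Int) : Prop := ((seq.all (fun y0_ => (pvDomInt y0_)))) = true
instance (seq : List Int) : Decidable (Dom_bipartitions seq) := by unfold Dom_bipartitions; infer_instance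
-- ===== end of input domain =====

-- B builds the powerset of the non-minimum items once (recursively, lex order) and emits, size by
-- size, each subset joined with the minimum anchor, partitioning in one pass; same values, same order.

-- ===== PORT A =====
-- port of itertools.combinations over a list (lexicographic by position)
def combos : Nat → List Int → List (List Int)
  | 0, _ => [[]]
  | _ + 1, [] => []
  | r + 1, x :: xs => ((combos r xs).map (fun c => x :: c)) ++ combos (r + 1) xs

def bipartitions (seq : List Int) : List (List (List Int)) :=
  let items := seq
  let smallest := (PySem.List.min? items (fun x => x)).getD 0   -- min(items); Pre_ excludes [] where Python raises
  let n : Int := items.length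
  (PySem.List.pyRange 1 n 1).flatMap (fun r =>
    ((combos r.toNat items).filter (fun c => decide (smallest ∈ c))).map
      (fun c => [c, items.filter (fun x => decide (x ∉ c))]))

-- ===== PORT B =====
-- port of _subseqs: all subsequences in lexicographic-by-position order, [] first
def subseqs : List Int → List (List Int)
  | [] => [[]]
  | x :: xs => [] :: (((subseqs xs).map (fun s => x :: s)) ++ (subseqs xs).drop 1)

def bipartitions_alt (seq : List Int) : List (List (List Int)) :=
  let items := seq
  let smallest := (PySem.List.min? items (fun x => x)).getD 0   -- min(items); Pre_ excludes [] where Python raises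
  let n : Int := items.length
  let rest := (PySem.List.remove? items smallest).getD items    -- rest.remove(smallest); smallest ∈ items under Pre_
  let subs := subseqs rest
  (PySem.List.pyRange 1 n 1).flatMap (fun r =>
    (subs.filter (fun s => decide ((s.length : Int) = r - 1))).map (fun sub =>
      -- single partitioning pass with two accumulators (first, other)
      let pr := items.foldl
        (fun (acc : List Int × List Int) x =>
          if x == smallest || decide (x ∈ sub) then (acc.1 ++ [x], acc.2) else (acc.1, acc.2 ++ [x]))
        ([], [])
      [pr.1, pr.2]))

-- ===== PRECONDITION & SPEC =====
-- Pre_ excludes the empty list, on which A raises ValueError (min of empty sequence), and lists with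
-- duplicate elements, which A's docstring forbids ('must contain unique items') and on which A's
-- value-based membership tests produce accidental repeated/mirror partitions.
def Pre_bipartitions (seq : List Int) : Prop := seq ≠ [] ∧ seq.Nodup
instance (seq : List Int) : Decidable (Pre_bipartitions seq) := by unfold Pre_bipartitions; infer_instance
def pvWitness_bipartitions : List Int := [2, 1, 3]

def Spec_bipartitions (seq : List Int) (out : List (List (List Int))) : Prop := out = bipartitions_alt seq
instance (seq : List Int) (out : List (List (List Int))) : Decidable (Spec_bipartitions seq out) := by unfold Spec_bipartitions; infer_instance

-- ===== CLAIM (what is proved, stated in full; the proofs are below) =====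
def Claim_equal_bipartitions : Prop := ∀ (seq : List Int), Dom_bipartitions seq → Pre_bipartitions seq → Spec_bipartitions seq (bipartitions seq)

-- ===== LEMMAS AND PROOFS =====

-- every generated combination is a sublist of the input
theorem combos_sublist {k : Nat} {l c : List Int} (h : c ∈ combos k l) : c.Sublist l := by
  induction l generalizing k c with
  | nil =>
    cases k with
    | zero => simp [combos] at h; simp [h]
    | succ k => simp [combos] at h
  | cons x xs ih =>
    cases k with
    | zero => simp [combos] at h; simp [h]
    | succ k =>
      simp only [combos, List.mem_append, List.mem_map] at h
      rcases h with ⟨c', hc', rfl⟩ | h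
      · exact List.Sublist.cons₂ x (ih hc')
      · exact List.Sublist.cons x (ih h)

-- filtering a nodup list down to the members of one of its sublists recovers that sublist
theorem filter_mem_sublist {s l : List Int} (h : s.Sublist l) (hn : l.Nodup) :
    l.filter (fun x => decide (x ∈ s)) = s := by
  induction h with
  | slnil => simp
  | cons a h ih =>
    rw [List.nodup_cons] at hn
    obtain ⟨ha, hn⟩ := hn
    have has : a ∉ _ := fun hm => ha (h.mem hm)
    simp only [List.filter_cons]
    rw [if_neg (by simpa using has)]
    exact ih hn
  | cons₂ a h ih =>
    rw [List.nodup_cons] at hn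
    obtain ⟨ha, hn⟩ := hn
    simp only [List.filter_cons]
    rw [if_pos (by simp)]
    congr 1
    rename_i l₁ l₂
    have hcg : l₂.filter (fun y => decide (y ∈ a :: l₁)) = l₂.filter (fun y => decide (y ∈ l₁)) := by
      apply List.filter_congr
      intro y hy
      have hya : y ≠ a := fun e => ha (e ▸ hy)
      simp [List.mem_cons, hya]
    rw [hcg]
    exact ih hn

-- core A-side fact: the anchor-containing (k+1)-combinations of l, in order, are exactly the
-- k-combinations of (l.erase m) with m re-inserted by an order-preserving filter over l
theorem combos_filter_anchor (m : Int) :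
    ∀ (l : List Int) (k : Nat), l.Nodup → m ∈ l →
      (combos (k + 1) l).filter (fun c => decide (m ∈ c)) =
      (combos k (l.erase m)).map (fun s => l.filter (fun x => decide (x = m ∨ x ∈ s))) := by
  intro l
  induction l with
  | nil => intro k _ hm; simp at hm
  | cons x xs ih =>
    intro k hn hm
    rw [List.nodup_cons] at hn
    obtain ⟨hx, hnxs⟩ := hn
    by_cases hmx : m = x
    · subst hmx
      rw [List.erase_cons_head]
      simp only [combos, List.filter_append]
      rw [List.filter_map]
      have h1 : List.filter ((fun c => decide (m ∈ c)) ∘ (fun c => m :: c)) (combos k xs)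
          = combos k xs := by
        apply List.filter_eq_self.mpr
        intro c _
        simp
      have h2 : List.filter (fun c => decide (m ∈ c)) (combos (k + 1) xs) = [] := by
        apply List.filter_eq_nil_iff.mpr
        intro c hc
        simp only [decide_eq_true_eq]
        exact fun hmem => hx ((combos_sublist hc).mem hmem)
      rw [h1, h2, List.append_nil]
      apply List.map_congr_left
      intro s hs
      have hsx : s.Sublist xs := combos_sublist hs
      have hfc : xs.filter (fun y => decide (y = m ∨ y ∈ s)) = xs.filter (fun y => decide (y ∈ s)) := by
        apply List.filter_congr
        intro y hy
        have : y ≠ m := fun e => hx (e ▸ hy)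
        simp [this]
      simp only [List.filter_cons]
      rw [if_pos (by simp), hfc, filter_mem_sublist hsx hnxs]
    · have hmxs : m ∈ xs := by
        rcases List.mem_cons.mp hm with h | h
        · exact absurd h hmx
        · exact h
      have hxm' : ¬(x = m) := fun e => hmx e.symm
      have herase : (x :: xs).erase m = x :: xs.erase m :=
        List.erase_cons_tail (by simpa using hxm')
      rw [herase]
      have hcons : ∀ s : List Int,
          (x :: xs).filter (fun y => decide (y = m ∨ y ∈ x :: s)) =
          x :: xs.filter (fun y => decide (y = m ∨ y ∈ s)) := by
        intro s
        simp only [List.filter_cons]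
        rw [if_pos (by simp)]
        congr 1
        apply List.filter_congr
        intro y hy
        have hyx : y ≠ x := fun e => hx (e ▸ hy)
        simp [List.mem_cons, hyx]
      have hskip : ∀ s : List Int, x ∉ s →
          (x :: xs).filter (fun y => decide (y = m ∨ y ∈ s)) =
          xs.filter (fun y => decide (y = m ∨ y ∈ s)) := by
        intro s hxs
        simp only [List.filter_cons]
        rw [if_neg (by simp [hxm', hxs])]
      cases k with
      | zero =>
        simp only [combos, List.map_cons, List.map_nil, List.filter_append, List.filter_cons,
          List.filter_nil]
        rw [if_neg (by simp [hmx])]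
        rw [ih 0 hnxs hmxs]
        simp only [combos, List.map_cons, List.map_nil, List.nil_append]
        congr 1
        rw [if_neg (by simp [hxm'])]
      | succ k' =>
        simp only [combos, List.filter_append]
        rw [List.filter_map]
        have hpred : List.filter ((fun c => decide (m ∈ c)) ∘ (fun c => x :: c)) (combos (k' + 1) xs)
            = List.filter (fun c => decide (m ∈ c)) (combos (k' + 1) xs) := by
          apply List.filter_congr
          intro c _
          simp [List.mem_cons, hmx]
        rw [hpred, ih k' hnxs hmxs, ih (k' + 1) hnxs hmxs]
        rw [List.map_append, List.map_map, List.map_map]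
        congr 1
        · apply List.map_congr_left
          intro s hs
          simp only [Function.comp_apply]
          exact (hcons s).symm
        · apply List.map_congr_left
          intro s hs
          have hxs : x ∉ s := fun hmem =>
            hx (((combos_sublist hs).trans List.erase_sublist).mem hmem)
          exact (hskip s hxs).symm

-- B-side fact 1: the length-k slice of the lex powerset is exactly the k-combinations
theorem subseqs_filter_len : ∀ (xs : List Int) (k : Nat),
    (subseqs xs).filter (fun s => s.length == k) = combos k xs := by
  intro xs
  induction xs with
  | nil =>
    intro k
    cases k with
    | zero => simp [subseqs, combos]
    | succ k => simp [subseqs, combos]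
  | cons x xs ih =>
    intro k
    have hhead : ∃ t, subseqs xs = [] :: t := by
      cases xs with
      | nil => exact ⟨[], rfl⟩
      | cons y ys => exact ⟨_, rfl⟩
    obtain ⟨t, ht⟩ := hhead
    cases k with
    | zero =>
      simp only [subseqs, List.filter_cons, List.filter_append, List.length_nil]
      rw [if_pos (by simp), List.filter_map]
      have h1 : List.filter ((fun s => s.length == 0) ∘ fun s => x :: s) (subseqs xs) = [] := by
        apply List.filter_eq_nil_iff.mpr; intro c _; simp
      have h2 : List.filter (fun s => s.length == 0) ((subseqs xs).drop 1) = [] := by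
        have ih0 := ih 0
        rw [ht] at ih0
        have hc : combos 0 xs = [[]] := by simp [combos]
        rw [hc] at ih0
        simp only [List.filter_cons, List.length_nil] at ih0
        rw [if_pos (by simp)] at ih0
        have h3 := (List.cons_eq_cons.mp ih0).2
        rw [ht]
        simpa using h3
      rw [h1, h2]
      simp [combos]
    | succ k' =>
      simp only [subseqs, List.filter_cons, List.filter_append, List.length_nil]
      rw [if_neg (by simp), List.filter_map]
      have h1 : List.filter ((fun s => s.length == k' + 1) ∘ fun s => x :: s) (subseqs xs)
          = combos k' xs := by
        rw [← ih k']
        apply List.filter_congr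
        intro s _
        simp
      have h2 : List.filter (fun s => s.length == k' + 1) ((subseqs xs).drop 1)
          = List.filter (fun s => s.length == k' + 1) (subseqs xs) := by
        rw [ht]
        simp only [List.drop_succ_cons, List.drop_zero, List.filter_cons, List.length_nil]
        rw [if_neg (by simp)]
      rw [h1, h2, ih (k' + 1)]
      rfl

-- B-side fact 2: the one-pass two-accumulator fold is the pair of filters
theorem foldl_partition (p : Int → Bool) :
    ∀ (l : List Int) (f o : List Int),
      l.foldl (fun (acc : List Int × List Int) x =>
          if p x then (acc.1 ++ [x], acc.2) else (acc.1, acc.2 ++ [x])) (f, o)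
        = (f ++ l.filter p, o ++ l.filter (fun x => !p x)) := by
  intro l
  induction l with
  | nil => intro f o; simp
  | cons x xs ih =>
    intro f o
    by_cases hp : p x
    · simp [List.foldl_cons, hp, ih, List.append_assoc]
    · simp [List.foldl_cons, hp, ih, List.append_assoc]

-- A and B agree on every nonempty duplicate-free input
theorem bip_eq (seq : List Int) (hne : seq ≠ []) (hnd : seq.Nodup) :
    bipartitions seq = bipartitions_alt seq := by
  obtain ⟨m, hm⟩ : ∃ m, PySem.List.min? seq (fun x => x) = some m := by
    cases h : PySem.List.min? seq (fun x => x) with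
    | none => exact absurd ((PySem.List.min?_eq_none_iff seq (fun x => x)).mp h) hne
    | some m => exact ⟨m, rfl⟩
  have hmem : m ∈ seq := PySem.List.min?_mem hm
  simp only [bipartitions, bipartitions_alt, hm, Option.getD_some,
    PySem.List.remove?_eq_some_erase seq m hmem]
  apply List.flatMap_congr
  intro r hr
  have hr1 : 1 ≤ r := (PySem.List.mem_pyRange_one.mp hr).1
  have hrt : r.toNat = (r - 1).toNat + 1 := by omega
  have hfl : (subseqs (seq.erase m)).filter (fun s => decide ((s.length : Int) = r - 1))
      = combos ((r - 1).toNat) (seq.erase m) := by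
    rw [← subseqs_filter_len]
    apply List.filter_congr
    intro s _
    rw [Bool.eq_iff_iff]
    simp only [decide_eq_true_eq, beq_iff_eq]
    omega
  rw [hrt, combos_filter_anchor m seq ((r - 1).toNat) hnd hmem, hfl, List.map_map]
  apply List.map_congr_left
  intro s hs
  simp only [Function.comp_apply]
  rw [foldl_partition]
  simp only [List.nil_append]
  congr 1
  · apply List.filter_congr
    intro x _
    rw [Bool.eq_iff_iff]
    simp
  congr 1
  apply List.filter_congr
  intro x hx
  have hmemf : (x ∈ seq.filter (fun y => decide (y = m ∨ y ∈ s))) ↔ (x = m ∨ x ∈ s) := by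
    simp [List.mem_filter, hx]
  by_cases h1 : x = m <;> by_cases h2 : x ∈ s <;> simp [hmemf, h1, h2, hx, hmem]

-- ===== VERDICT (by name: the statement is the Claim_ definition above) =====
theorem bipartitions_spec : Claim_equal_bipartitions := by
  intro seq _ hpre
  exact bip_eq seq hpre.1 hpre.2
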